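-- pv_equiv track=rewrite | github.com/bjoernd/cj | cjlib/config.py | _extract_packages_from_dockerfile
-- ===== SOURCE A (Python) =====
-- def _extract_packages_from_dockerfile(dockerfile_content: str) -> set[str]:
--     """Extract package names from apt-get install lines in Dockerfile.
--
--     Args:
--         dockerfile_content: Content of the Dockerfile
--
--     Returns:
--         Set of package names found in apt-get install commands
--     """
--     packages = set()
--     lines = dockerfile_content.split("\n")
--     in_apt_install = False
--
--     for line in lines:
--         stripped = line.strip()
--
--         # Check if this line starts an apt-get install command
--         if "apt-get install" in stripped:
--             in_apt_install = True
--
--         if in_apt_install: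
--             # Extract package names (skip flags like -y and line continuations)
--             parts = stripped.split()
--             for part in parts:
--                 # Skip apt-get command itself, flags, and line continuations
--                 if part not in ["RUN", "apt-get", "install", "-y", "&&", "\\"]:
--                     # Remove trailing backslash if present
--                     pkg = part.rstrip("\\").strip()
--                     if pkg:
--                         packages.add(pkg)
--
--             # Check if line ends (no continuation)
--             if not stripped.endswith("\\"):
--                 in_apt_install = False
--
--     return packages
-- ===== SOURCE B (Python) =====
-- def _extract_packages_from_dockerfile(dockerfile_content: str) -> set[str]:
--     """Extract package names from apt-get install lines in Dockerfile.
--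
--     Staged-passes algorithm: (1) strip all lines; (2) group the stripped
--     lines into maximal backslash-continuation chains; (3) within each
--     chain, drop lines before the first one containing 'apt-get install'
--     and harvest package tokens from the remaining suffix of the chain.
--     Correct because A's in_apt_install flag turns on exactly at the first
--     trigger line of a chain and resets at the chain's last line.
--     """
--     skip = {"RUN", "apt-get", "install", "-y", "&&", "\\"}
--     stripped = [line.strip() for line in dockerfile_content.split("\n")]
--
--     # Stage 1: group stripped lines into continuation chains
--     chains, cur = [], []
--     for s in stripped:
--         cur.append(s)
--         if not s.endswith("\\"):
--             chains.append(cur)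
--             cur = []
--     if cur:
--         chains.append(cur)
--
--     # Stage 2: per chain, drop the prefix before the first trigger line,
--     # then collect package tokens from the rest of the chain
--     packages = set()
--     for chain in chains:
--         i = 0
--         while i < len(chain) and "apt-get install" not in chain[i]:
--             i += 1
--         for s in chain[i:]:
--             for part in s.split():
--                 if part not in skip:
--                     pkg = part.rstrip("\\").strip()
--                     if pkg:
--                         packages.add(pkg)
--     return packages
-- ===== Notes on version B (the rewrite author's own statement) =====
-- stated objective: alternative
-- what changed: Replaces A's single streaming pass with an in_apt_install boolean state machine by a staged-passes algorithm: strip all lines, group them into maximal backslash-continuation chains, then per chain drop the prefix before the first 'apt-get install' line and harvest tokens from the remaining suffix.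
import Mathlib
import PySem

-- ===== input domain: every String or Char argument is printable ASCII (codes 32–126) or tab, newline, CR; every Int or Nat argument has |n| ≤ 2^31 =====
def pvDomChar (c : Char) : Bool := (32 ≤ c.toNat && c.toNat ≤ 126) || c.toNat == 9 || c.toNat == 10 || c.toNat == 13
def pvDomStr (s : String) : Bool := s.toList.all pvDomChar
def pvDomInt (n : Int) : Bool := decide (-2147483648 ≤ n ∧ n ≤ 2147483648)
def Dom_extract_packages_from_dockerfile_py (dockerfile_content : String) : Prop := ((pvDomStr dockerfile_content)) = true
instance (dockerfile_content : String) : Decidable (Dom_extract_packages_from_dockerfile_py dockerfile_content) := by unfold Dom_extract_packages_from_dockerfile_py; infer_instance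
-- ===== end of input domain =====

-- B replaces A's streaming boolean state machine by staged passes: strip all lines,
-- group into backslash-continuation chains, then per chain collect tokens from the
-- first trigger line onward (objective: alternative decomposition, same cost).

-- ===== PORT A =====
-- s.rstrip("\\"): exact hand port — drops trailing backslash characters
def pvRstripBackslash (s : String) : String :=
  String.ofList ((s.toList.reverse.dropWhile (fun c => c == '\\')).reverse)

def pvSkip : List String := ["RUN", "apt-get", "install", "-y", "&&", "\\"]

-- the inner 'for part in parts' loop of A
def pvAddParts (packages : PySem.Set String) (stripped : String) : PySem.Set String :=
  (PySem.Str.split₀ stripped).foldl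
    (fun pk part =>
      if !(pvSkip.contains part) then
        let pkg := PySem.Str.strip (pvRstripBackslash part)
        if pkg ≠ "" then PySem.Set.add pk pkg else pk
      else pk)
    packages

-- A's loop body on the already-stripped line, state = (packages, in_apt_install)
def pvStepS (st : PySem.Set String × Bool) (stripped : String) : PySem.Set String × Bool :=
  let in_apt := if PySem.Str.isIn "apt-get install" stripped then true else st.2
  if in_apt then
    (pvAddParts st.1 stripped, if !(PySem.Str.endswith stripped "\\") then false else in_apt)
  else
    (st.1, in_apt)

-- one iteration of A's 'for line in lines' loop: stripped := line.strip(), then the body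
def pvStepA (st : PySem.Set String × Bool) (line : String) : PySem.Set String × Bool :=
  pvStepS st (PySem.Str.strip line)

def extract_packages_from_dockerfile_py (dockerfile_content : String) : List String :=
  (((PySem.Str.split? dockerfile_content "\n").getD []).foldl pvStepA (PySem.Set.empty, false)).1

-- ===== PORT B =====
def pvSkipSet : PySem.Set String := PySem.Set.ofList ["RUN", "apt-get", "install", "-y", "&&", "\\"]

-- B's innermost token loop 'for part in s.split()'
def pvCollectB (packages : PySem.Set String) (s : String) : PySem.Set String :=
  (PySem.Str.split₀ s).foldl
    (fun pk part =>
      if !(PySem.Set.contains pvSkipSet part) then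
        let pkg := PySem.Str.strip (pvRstripBackslash part)
        if pkg ≠ "" then PySem.Set.add pk pkg else pk
      else pk)
    packages

-- Stage-1 loop body of B: append s to cur; flush cur as a chain when s has no continuation
def pvGStep (st : List (List String) × List String) (s : String) : List (List String) × List String :=
  let cur := st.2 ++ [s]
  if !(PySem.Str.endswith s "\\") then (st.1 ++ [cur], []) else (st.1, cur)

-- B's trailing 'if cur: chains.append(cur)'
def pvFinish (st : List (List String) × List String) : List (List String) :=
  if st.2 = [] then st.1 else st.1 ++ [st.2]

-- Stage-2 loop body of B: chain[i:] with i = index of the first trigger line (= dropWhile),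
-- then collect tokens from the remaining lines
def pvProcessChain (packages : PySem.Set String) (chain : List String) : PySem.Set String :=
  (chain.dropWhile (fun s => !(PySem.Str.isIn "apt-get install" s))).foldl pvCollectB packages

def extract_packages_from_dockerfile_py_alt (dockerfile_content : String) : List String :=
  (pvFinish ((((PySem.Str.split? dockerfile_content "\n").getD []).map PySem.Str.strip).foldl
      pvGStep ([], []))).foldl pvProcessChain PySem.Set.empty

-- ===== PRECONDITION & SPEC =====
def Spec_extract_packages_from_dockerfile_py (dockerfile_content : String) (out : List String) : Prop := out = extract_packages_from_dockerfile_py_alt dockerfile_content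
instance (dockerfile_content : String) (out : List String) : Decidable (Spec_extract_packages_from_dockerfile_py dockerfile_content out) := by unfold Spec_extract_packages_from_dockerfile_py; infer_instance

-- ===== CLAIM (what is proved, stated in full; the proofs are below) =====
def Claim_equal_extract_packages_from_dockerfile_py : Prop := ∀ (dockerfile_content : String), Dom_extract_packages_from_dockerfile_py dockerfile_content → Spec_extract_packages_from_dockerfile_py dockerfile_content (extract_packages_from_dockerfile_py dockerfile_content)

-- ===== LEMMAS AND PROOFS =====
-- B's collect equals A's collect (the skip set holds exactly A's skip list)
theorem pvCollectB_eq_addParts : pvCollectB = pvAddParts := by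
  funext pk s
  have h : ∀ part, PySem.Set.contains pvSkipSet part = pvSkip.contains part := by
    intro part; rfl
  simp only [pvCollectB, pvAddParts, h]

-- recursive characterisation of B's stage-1 grouping: pvH cur S = chains of S with cur
-- prefixed to the first chain
def pvH : List String → List String → List (List String)
  | cur, [] => if cur = [] then [] else [cur]
  | cur, s :: rest =>
    if PySem.Str.endswith s "\\" then pvH (cur ++ [s]) rest
    else (cur ++ [s]) :: pvH [] rest

theorem pvGfold_eq_pvH : ∀ (S : List String) (acc : List (List String)) (cur : List String),
    pvFinish (S.foldl pvGStep (acc, cur)) = acc ++ pvH cur S := by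
  intro S
  induction S with
  | nil =>
    intro acc cur
    simp only [List.foldl_nil, pvFinish, pvH]
    split <;> simp_all
  | cons s rest ih =>
    intro acc cur
    simp only [List.foldl_cons]
    cases he : PySem.Str.endswith s "\\" with
    | true =>
      have hg : pvGStep (acc, cur) s = (acc, cur ++ [s]) := by
        simp only [pvGStep, he, Bool.not_true, Bool.false_eq_true, if_false]
      rw [hg, ih]
      simp only [pvH, he, if_true]
    | false =>
      have hg : pvGStep (acc, cur) s = (acc ++ [cur ++ [s]], []) := by
        simp only [pvGStep, he, Bool.not_false, if_true]
      rw [hg, ih]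
      simp only [pvH, he, Bool.false_eq_true, if_false, List.append_assoc, List.singleton_append]

-- split S into its first continuation chain and the remaining lines
def pvSplit : List String → List String × List String
  | [] => ([], [])
  | s :: rest =>
    if PySem.Str.endswith s "\\" then ((s :: (pvSplit rest).1), (pvSplit rest).2)
    else ([s], rest)

theorem pvH_expose : ∀ (S cur : List String), cur ≠ [] ∨ S ≠ [] →
    pvH cur S = (cur ++ (pvSplit S).1) :: pvH [] (pvSplit S).2 := by
  intro S
  induction S with
  | nil =>
    intro cur h
    rcases h with h | h
    · simp [pvH, pvSplit, h]
    · simp at h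
  | cons s rest ih =>
    intro cur _
    cases he : PySem.Str.endswith s "\\" with
    | true =>
      simp only [pvH, pvSplit, he, if_true]
      rw [ih (cur ++ [s]) (Or.inl (by simp))]
      simp
    | false =>
      simp only [pvH, pvSplit, he, Bool.false_eq_true, if_false]

theorem pvDropWhile_all (cur : List String)
    (h : ∀ s ∈ cur, PySem.Str.isIn "apt-get install" s = false) (tail : List String) :
    (cur ++ tail).dropWhile (fun s => !(PySem.Str.isIn "apt-get install" s)) =
      tail.dropWhile (fun s => !(PySem.Str.isIn "apt-get install" s)) := by
  induction cur with
  | nil => simp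
  | cons c cs ih =>
    have hc := h c (by simp)
    simp only [List.cons_append, List.dropWhile_cons, hc, Bool.not_false, if_true]
    exact ih (fun s hs => h s (by simp [hs]))

theorem pvStep_false_trig (pk : PySem.Set String) (s : String)
    (ht : PySem.Str.isIn "apt-get install" s = true) :
    pvStepS (pk, false) s =
      (pvAddParts pk s, if !(PySem.Str.endswith s "\\") then false else true) := by
  simp only [pvStepS, ht, if_true]

theorem pvStep_false_notrig (pk : PySem.Set String) (s : String)
    (ht : PySem.Str.isIn "apt-get install" s = false) :
    pvStepS (pk, false) s = (pk, false) := by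
  simp only [pvStepS, ht, Bool.false_eq_true, if_false]

theorem pvStep_true (pk : PySem.Set String) (s : String) :
    pvStepS (pk, true) s =
      (pvAddParts pk s, if !(PySem.Str.endswith s "\\") then false else true) := by
  cases ht : PySem.Str.isIn "apt-get install" s with
  | true => simp only [pvStepS, ht, if_true]
  | false => simp only [pvStepS, ht, Bool.false_eq_true, if_false, if_true]

-- the core invariant: A's fold from flag=false computes B's chain processing, and from
-- flag=true it first finishes the current chain, then proceeds as from flag=false
theorem pv_main : ∀ (S : List String),
    (∀ (pk : PySem.Set String) (cur : List String),
      (∀ s ∈ cur, PySem.Str.isIn "apt-get install" s = false) →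
      (S.foldl pvStepS (pk, false)).1 = (pvH cur S).foldl pvProcessChain pk) ∧
    (∀ pk : PySem.Set String,
      (S.foldl pvStepS (pk, true)).1 =
        (pvH [] (pvSplit S).2).foldl pvProcessChain ((pvSplit S).1.foldl pvCollectB pk)) := by
  intro S
  induction S with
  | nil =>
    refine ⟨fun pk cur hcur => ?_, fun pk => by simp [pvSplit, pvH]⟩
    simp only [List.foldl_nil, pvH]
    by_cases hc : cur = []
    · simp [hc]
    · simp only [hc, if_false, List.foldl_cons, List.foldl_nil, pvProcessChain]
      rw [show cur = cur ++ [] by simp, pvDropWhile_all cur hcur []]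
      simp
  | cons s rest ih =>
    constructor
    · intro pk cur hcur
      cases ht : PySem.Str.isIn "apt-get install" s with
      | true =>
        rw [List.foldl_cons, pvStep_false_trig pk s ht]
        cases he : PySem.Str.endswith s "\\" with
        | true =>
          simp only [Bool.not_true, Bool.false_eq_true, if_false]
          rw [ih.2, pvH_expose (s :: rest) cur (Or.inr (by simp))]
          simp only [pvSplit, he, if_true, List.foldl_cons, pvProcessChain]
          rw [pvDropWhile_all cur hcur (s :: (pvSplit rest).1)]
          simp only [List.dropWhile_cons, ht, Bool.not_true, Bool.false_eq_true, if_false,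
            List.foldl_cons, pvCollectB_eq_addParts]
        | false =>
          simp only [Bool.not_false, if_true]
          rw [ih.1 (pvAddParts pk s) [] (by simp),
            pvH_expose (s :: rest) cur (Or.inr (by simp))]
          simp only [pvSplit, he, Bool.false_eq_true, if_false, List.foldl_cons, pvProcessChain]
          rw [pvDropWhile_all cur hcur [s]]
          simp only [List.dropWhile_cons, ht, Bool.not_true, Bool.false_eq_true, if_false,
            List.foldl_cons, List.foldl_nil, pvCollectB_eq_addParts]
      | false =>
        rw [List.foldl_cons, pvStep_false_notrig pk s ht]
        cases he : PySem.Str.endswith s "\\" with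
        | true =>
          rw [ih.1 pk (cur ++ [s]) (by
            intro x hx
            rcases List.mem_append.1 hx with h | h
            · exact hcur x h
            · simp at h; simpa [h] using ht)]
          simp only [pvH, he, if_true]
        | false =>
          rw [ih.1 pk [] (by simp)]
          simp only [pvH, he, Bool.false_eq_true, if_false, List.foldl_cons, pvProcessChain]
          rw [show cur ++ [s] = (cur ++ [s]) ++ ([] : List String) by simp,
            pvDropWhile_all (cur ++ [s]) (by
              intro x hx
              rcases List.mem_append.1 hx with h | h
              · exact hcur x h
              · simp at h; simpa [h] using ht) []]
          simp
    · intro pk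
      rw [List.foldl_cons, pvStep_true pk s]
      cases he : PySem.Str.endswith s "\\" with
      | true =>
        simp only [Bool.not_true, Bool.false_eq_true, if_false]
        rw [ih.2]
        simp only [pvSplit, he, if_true, List.foldl_cons, pvCollectB_eq_addParts]
      | false =>
        simp only [Bool.not_false, if_true]
        rw [ih.1 (pvAddParts pk s) [] (by simp)]
        simp only [pvSplit, he, Bool.false_eq_true, if_false, List.foldl_cons, List.foldl_nil,
          pvCollectB_eq_addParts]

-- ===== VERDICT (by name: the statement is the Claim_ definition above) =====
theorem extract_packages_from_dockerfile_py_spec : Claim_equal_extract_packages_from_dockerfile_py := by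
  intro c _
  unfold Spec_extract_packages_from_dockerfile_py
  unfold extract_packages_from_dockerfile_py extract_packages_from_dockerfile_py_alt
  rw [pvGfold_eq_pvH, List.nil_append]
  rw [show ∀ (L : List String) init, L.foldl pvStepA init =
        (L.map PySem.Str.strip).foldl pvStepS init from fun L init => by rw [List.foldl_map]; rfl]
  exact (pv_main _).1 PySem.Set.empty [] (by simp)
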